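-- pv_equiv track=rewrite | github.com/monisharaja1/ResumeForge-Pro | resume_assistant.py | _sanitize_string_list
-- ===== SOURCE A (Python) =====
-- from typing import Any, Dict, List, Optional, Tuple
--
-- def _sanitize_string(value: Any, max_chars: int = 1200) -> str:
--     text = str(value or "").strip()
--     if not text:
--         return ""
--     return text[:max_chars]
--
-- def _sanitize_string_list(values: Any, max_items: int = 25, max_chars: int = 80) -> List[str]:
--     if not isinstance(values, list):
--         return []
--     out: List[str] = []
--     seen = set()
--     for v in values:
--         s = _sanitize_string(v, max_chars)
--         if not s:
--             continue
--         k = s.lower()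
--         if k in seen:
--             continue
--         seen.add(k)
--         out.append(s)
--         if len(out) >= max_items:
--             break
--     return out
-- ===== SOURCE B (Python) =====
-- from typing import Any, List
--
-- def _sanitize_string(value: Any, max_chars: int = 1200) -> str:
--     text = str(value or "").strip()
--     if not text:
--         return ""
--     return text[:max_chars]
--
-- def _sanitize_string_list(values: Any, max_items: int = 25, max_chars: int = 80) -> List[str]:
--     if not isinstance(values, list):
--         return []
--     # build back-to-front: walk the list in reverse; each newer (earlier) string is
--     # prepended and evicts any same-keyed string already in the accumulated result,
--     # so no seen-set is needed; cap with a final slice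
--     out: List[str] = []
--     for v in reversed(values):
--         s = _sanitize_string(v, max_chars)
--         if s:
--             out = [s] + [t for t in out if t.lower() != s.lower()]
--     return out[:max_items]
-- ===== Notes on version B (the rewrite author's own statement) =====
-- stated objective: alternative
-- what changed: Builds the result back-to-front: walks the list in reverse and lets each earlier string evict same-keyed strings from the accumulated result by filtering, so the seen-set and early break disappear; the cap becomes a final slice.
-- intended difference: When max_items = 0 and the list contains at least one sanitizable string, A returns a one-element list (it appends before testing the cap) while B returns the empty list, the intended result for a zero cap. — e.g. on _sanitize_string_list(["a"], 0, 80): A returns ["a"], B returns []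
-- outside the precondition, e.g. on _sanitize_string_list(['a', 'b'], -1, 80): A returns ['a'], B returns ['a']; on _sanitize_string_list(['a'], -2, 80): A returns ['a'], B returns []
import Mathlib
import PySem

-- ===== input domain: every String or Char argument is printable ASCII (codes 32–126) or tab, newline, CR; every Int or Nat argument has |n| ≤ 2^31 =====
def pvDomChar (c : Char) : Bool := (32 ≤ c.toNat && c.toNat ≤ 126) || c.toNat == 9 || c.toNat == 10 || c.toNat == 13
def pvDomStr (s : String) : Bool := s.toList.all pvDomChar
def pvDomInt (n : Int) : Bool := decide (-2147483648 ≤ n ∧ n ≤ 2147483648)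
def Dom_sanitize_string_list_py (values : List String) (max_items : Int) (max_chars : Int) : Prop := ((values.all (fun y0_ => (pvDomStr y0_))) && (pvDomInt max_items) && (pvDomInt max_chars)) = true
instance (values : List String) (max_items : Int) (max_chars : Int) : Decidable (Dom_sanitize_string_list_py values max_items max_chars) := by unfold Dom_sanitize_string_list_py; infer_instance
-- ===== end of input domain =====

-- B replaces A's forward loop (seen set + output accumulator + early break) by a back-to-front
-- build: walking the list in reverse, each earlier string is prepended and evicts same-keyed
-- strings from the accumulated result by filtering; the cap becomes a final slice. Objective:
-- alternative (not faster).

-- ===== PORT A =====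
-- _sanitize_string: on a String argument, str(value or "") is the string itself, so strip then [:max_chars]
def pvSanitize (value : String) (max_chars : Int) : String :=
  let text := PySem.Str.strip value
  if text = "" then "" else PySem.Str.slice text none (some max_chars)

def pvLoopA (max_items max_chars : Int) : List String → List String → PySem.Set String → List String
  | [], out, _ => out
  | v :: vs, out, seen =>
    let s := pvSanitize v max_chars
    if s = "" then pvLoopA max_items max_chars vs out seen
    else
      let k := PySem.Str.lower s
      if PySem.Set.contains seen k then pvLoopA max_items max_chars vs out seen
      else
        let out' := out ++ [s]
        if max_items ≤ (out'.length : Int) then out'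
        else pvLoopA max_items max_chars vs out' (PySem.Set.add seen k)

def sanitize_string_list_py (values : List String) (max_items : Int) (max_chars : Int) : List String :=
  pvLoopA max_items max_chars values [] PySem.Set.empty

-- ===== PORT B =====
-- for v in reversed(values): out = [s] + [t for t in out if t.lower() != s.lower()]; return out[:max_items]
def sanitize_string_list_py_alt (values : List String) (max_items : Int) (max_chars : Int) : List String :=
  let out := values.reverse.foldl (fun out v =>
      let s := pvSanitize v max_chars
      if s = "" then out
      else s :: out.filter (fun t => PySem.Str.lower t != PySem.Str.lower s)) []
  PySem.List.slice out none (some max_items)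

-- ===== PRECONDITION & SPEC =====
-- Pre_ excludes negative max_items, a meaningless cap on which A's one-item result (it appends
-- before testing the cap) and B's negative-index slice are both accidental.
def Pre_sanitize_string_list_py (values : List String) (max_items : Int) (max_chars : Int) : Prop :=
  0 ≤ max_items
instance (values : List String) (max_items : Int) (max_chars : Int) : Decidable (Pre_sanitize_string_list_py values max_items max_chars) := by unfold Pre_sanitize_string_list_py; infer_instance

def pvWitness_sanitize_string_list_py : List String × Int × Int := (["  Hi ", "hi", "", "x"], 2, 80)

-- When max_items = 0 and the list contains at least one sanitizable string, A returns a
-- one-element list (it appends before testing the cap) while B returns the empty list, the intended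
-- result for a zero cap.
def D_sanitize_string_list_py (values : List String) (max_items : Int) (max_chars : Int) : Prop :=
  max_items = 0 ∧ ∃ v ∈ values, pvSanitize v max_chars ≠ ""
instance (values : List String) (max_items : Int) (max_chars : Int) : Decidable (D_sanitize_string_list_py values max_items max_chars) := by unfold D_sanitize_string_list_py; infer_instance

def Spec_sanitize_string_list_py (values : List String) (max_items : Int) (max_chars : Int) (out : List String) : Prop := ¬ D_sanitize_string_list_py values max_items max_chars → out = sanitize_string_list_py_alt values max_items max_chars
instance (values : List String) (max_items : Int) (max_chars : Int) (out : List String) : Decidable (Spec_sanitize_string_list_py values max_items max_chars out) := by unfold Spec_sanitize_string_list_py; infer_instance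

def pvDiffWitness_sanitize_string_list_py : List String × Int × Int := (["a"], 0, 80)
def pvDiffWitnessOut_sanitize_string_list_py : (List String) × (List String) := (["a"], [])

-- ===== CLAIM (what is proved, stated in full; the proofs are below) =====
def Claim_unchanged_sanitize_string_list_py : Prop := ∀ (values : List String) (max_items : Int) (max_chars : Int), Dom_sanitize_string_list_py values max_items max_chars → Pre_sanitize_string_list_py values max_items max_chars → Spec_sanitize_string_list_py values max_items max_chars (sanitize_string_list_py values max_items max_chars)
def Claim_changed_sanitize_string_list_py : Prop := Dom_sanitize_string_list_py (pvDiffWitness_sanitize_string_list_py.1) (pvDiffWitness_sanitize_string_list_py.2.1) (pvDiffWitness_sanitize_string_list_py.2.2) ∧ Pre_sanitize_string_list_py (pvDiffWitness_sanitize_string_list_py.1) (pvDiffWitness_sanitize_string_list_py.2.1) (pvDiffWitness_sanitize_string_list_py.2.2) ∧ D_sanitize_string_list_py (pvDiffWitness_sanitize_string_list_py.1) (pvDiffWitness_sanitize_string_list_py.2.1) (pvDiffWitness_sanitize_string_list_py.2.2) ∧ sanitize_string_list_py (pvDiffWitness_sanitize_string_list_py.1) (pvDiffWitness_sanitize_string_list_py.2.1)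 (pvDiffWitness_sanitize_string_list_py.2.2) = pvDiffWitnessOut_sanitize_string_list_py.1 ∧ sanitize_string_list_py_alt (pvDiffWitness_sanitize_string_list_py.1) (pvDiffWitness_sanitize_string_list_py.2.1) (pvDiffWitness_sanitize_string_list_py.2.2) = pvDiffWitnessOut_sanitize_string_list_py.2 ∧ pvDiffWitnessOut_sanitize_string_list_py.1 ≠ pvDiffWitnessOut_sanitize_string_list_py.2
def Claim_exact_sanitize_string_list_py : Prop := ∀ (values : List String) (max_items : Int) (max_chars : Int), Dom_sanitize_string_list_py values max_items max_chars → Pre_sanitize_string_list_py values max_items max_chars → D_sanitize_string_list_py values max_items max_chars → sanitize_string_list_py values max_items max_chars ≠ sanitize_string_list_py_alt values max_items max_chars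

-- ===== LEMMAS AND PROOFS =====

-- canonical first-occurrence dedup of the sanitized nonempty strings, keyed by lowercase
def pvDedup (max_chars : Int) : List String → List String → List String
  | [], _ => []
  | v :: vs, seen =>
    let s := pvSanitize v max_chars
    if s = "" then pvDedup max_chars vs seen
    else if PySem.Str.lower s ∈ seen then pvDedup max_chars vs seen
    else s :: pvDedup max_chars vs (PySem.Str.lower s :: seen)

-- the back-to-front accumulator of B, as a foldr over the original list
def pvRevAcc (max_chars : Int) (vs : List String) : List String :=
  vs.foldr (fun v out =>
      let s := pvSanitize v max_chars
      if s = "" then out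
      else s :: out.filter (fun t => PySem.Str.lower t != PySem.Str.lower s)) []

lemma pvSetContains (s : PySem.Set String) (k : String) :
    PySem.Set.contains s k = true ↔ k ∈ s := by
  simp [PySem.Set.contains]

lemma pvLoopA_eq (mc m : Int) :
    ∀ (vs out : List String) (seen : PySem.Set String) (L : List String),
      (∀ k, PySem.Set.contains seen k = true ↔ k ∈ L) →
      (out.length : Int) < m →
      pvLoopA m mc vs out seen = out ++ (pvDedup mc vs L).take (m - out.length).toNat := by
  intro vs
  induction vs with
  | nil => intro out seen L _ _; simp [pvLoopA, pvDedup]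
  | cons v vs ih =>
    intro out seen L hL hlt
    simp only [pvLoopA, pvDedup]
    by_cases hs : pvSanitize v mc = ""
    · simp only [hs, if_pos rfl]
      exact ih out seen L hL hlt
    · simp only [if_neg hs]
      by_cases hk : PySem.Str.lower (pvSanitize v mc) ∈ L
      · rw [if_pos ((hL _).mpr hk), if_pos hk]
        exact ih out seen L hL hlt
      · rw [if_neg (fun h => hk ((hL _).mp h)), if_neg hk]
        by_cases hstop : m ≤ ((out ++ [pvSanitize v mc]).length : Int)
        · rw [if_pos hstop]
          have hm : m - (out.length : Int) = 1 := by
            simp only [List.length_append, List.length_cons, List.length_nil] at hstop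
            omega
          rw [hm]
          simp
        · rw [if_neg hstop]
          have hlt' : ((out ++ [pvSanitize v mc]).length : Int) < m := by omega
          have hL' : ∀ k, PySem.Set.contains (PySem.Set.add seen (PySem.Str.lower (pvSanitize v mc))) k = true
              ↔ k ∈ PySem.Str.lower (pvSanitize v mc) :: L := by
            intro k
            rw [pvSetContains, PySem.Set.mem_add]
            constructor
            · rintro (h | h)
              · exact .tail _ ((hL k).mp ((pvSetContains seen k).mpr h))
              · exact h ▸ .head _
            · intro h
              rcases List.mem_cons.mp h with h | h
              · exact Or.inr h
              · exact Or.inl ((pvSetContains seen k).mp ((hL k).mpr h))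
          rw [ih _ _ _ hL' hlt']
          have htn : (m - (out.length : Int)).toNat = (m - ((out.length : Int) + 1)).toNat + 1 := by
            have := hlt'
            simp only [List.length_append, List.length_cons, List.length_nil] at this
            omega
          rw [htn]
          simp

-- forward first-occurrence dedup = back-to-front eviction build, filtered by the seen keys
lemma pvRevAcc_cons (mc : Int) (v : String) (vs : List String) :
    pvRevAcc mc (v :: vs)
      = (if pvSanitize v mc = "" then pvRevAcc mc vs
         else pvSanitize v mc ::
           (pvRevAcc mc vs).filter
             (fun t => PySem.Str.lower t != PySem.Str.lower (pvSanitize v mc))) := by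
  simp [pvRevAcc]

lemma pvDedup_eq_filter_revAcc (mc : Int) :
    ∀ (vs seen : List String),
      pvDedup mc vs seen
        = (pvRevAcc mc vs).filter (fun t => !(seen.contains (PySem.Str.lower t))) := by
  intro vs
  induction vs with
  | nil => intro seen; simp [pvDedup, pvRevAcc]
  | cons v vs ih =>
    intro seen
    rw [pvRevAcc_cons]
    simp only [pvDedup]
    by_cases hs : pvSanitize v mc = ""
    · simp only [hs, if_pos rfl]
      exact ih seen
    · simp only [if_neg hs]
      by_cases hk : PySem.Str.lower (pvSanitize v mc) ∈ seen
      · have hc : (seen.contains (PySem.Str.lower (pvSanitize v mc))) = true := by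
          simpa using hk
        rw [if_pos hk, ih seen,
          List.filter_cons_of_neg (by rw [hc]; simp),
          List.filter_filter]
        refine List.filter_congr ?_
        intro t _
        cases hb : seen.contains (PySem.Str.lower t) with
        | true => rfl
        | false =>
          have hne : PySem.Str.lower t ≠ PySem.Str.lower (pvSanitize v mc) := by
            intro h
            rw [h] at hb
            exact Bool.noConfusion (hc.symm.trans hb)
          rw [bne_iff_ne.mpr hne]
          rfl
      · have hc : (seen.contains (PySem.Str.lower (pvSanitize v mc))) = false := by
          simpa using hk
        have hpos : (!(seen.contains (PySem.Str.lower (pvSanitize v mc)))) = true := by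
          simpa using hk
        rw [if_neg hk, ih (PySem.Str.lower (pvSanitize v mc) :: seen),
          List.filter_cons_of_pos (p := fun t => !(seen.contains (PySem.Str.lower t))) hpos,
          List.filter_filter]
        refine congrArg (List.cons (pvSanitize v mc)) (List.filter_congr ?_)
        intro t _
        simp only [List.contains_cons, Bool.not_or, bne]
        exact Bool.and_comm _ _

lemma pvLoopA_all_empty (mc m : Int) :
    ∀ (vs out : List String) (seen : PySem.Set String),
      (∀ v ∈ vs, pvSanitize v mc = "") →
      pvLoopA m mc vs out seen = out := by
  intro vs
  induction vs with
  | nil => intro out seen _; simp [pvLoopA]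
  | cons v vs ih =>
    intro out seen h
    simp only [pvLoopA, h v (.head _), if_pos rfl]
    exact ih out seen (fun w hw => h w (.tail _ hw))

lemma pvRevAcc_all_empty (mc : Int) :
    ∀ (vs : List String), (∀ v ∈ vs, pvSanitize v mc = "") → pvRevAcc mc vs = [] := by
  intro vs
  induction vs with
  | nil => intro _; simp [pvRevAcc]
  | cons v vs ih =>
    intro h
    simp only [pvRevAcc, List.foldr_cons, h v (.head _), if_pos rfl]
    exact ih (fun w hw => h w (.tail _ hw))

lemma pvLoopA_zero_ne_nil (mc : Int) :
    ∀ (vs : List String), (∃ v ∈ vs, pvSanitize v mc ≠ "") →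
      pvLoopA 0 mc vs [] PySem.Set.empty ≠ [] := by
  intro vs
  induction vs with
  | nil => rintro ⟨v, hv, _⟩; exact absurd hv (List.not_mem_nil)
  | cons v vs ih =>
    rintro ⟨w, hw, hne⟩
    simp only [pvLoopA]
    by_cases hs : pvSanitize v mc = ""
    · simp only [hs, if_pos rfl]
      rcases List.mem_cons.mp hw with h | h
      · exact absurd (h ▸ hne) (by simp [hs])
      · exact ih ⟨w, h, hne⟩
    · simp only [if_neg hs]
      rw [if_neg (by simp [PySem.Set.contains, PySem.Set.empty])]
      rw [if_pos (by simp)]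
      simp

lemma pvB_eq_take (values : List String) (m mc : Int) (hm : 0 ≤ m) :
    sanitize_string_list_py_alt values m mc
      = (pvDedup mc values []).take m.toNat := by
  simp only [sanitize_string_list_py_alt]
  have hfold : values.reverse.foldl (fun out v =>
      let s := pvSanitize v mc
      if s = "" then out
      else s :: out.filter (fun t => PySem.Str.lower t != PySem.Str.lower s)) []
      = pvRevAcc mc values := by
    rw [List.foldl_reverse]
    rfl
  rw [hfold, PySem.List.slice_to _ hm]
  rw [pvDedup_eq_filter_revAcc mc values []]
  simp

-- ===== VERDICT (by name: the statement is the Claim_ definition above) =====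
theorem sanitize_string_list_py_spec : Claim_unchanged_sanitize_string_list_py := by
  intro values m mc _ hpre hnd
  have hm' : (0:Int) ≤ m := hpre
  rw [pvB_eq_take values m mc hm']
  by_cases hm : 0 < m
  · unfold sanitize_string_list_py
    rw [pvLoopA_eq mc m values [] PySem.Set.empty []
        (by intro k; simp [PySem.Set.contains, PySem.Set.empty]) (by simpa using hm)]
    simp
  · have hm0 : m = 0 := by omega
    subst hm0
    have hall : ∀ v ∈ values, pvSanitize v mc = "" := by
      by_contra hcon
      push_neg at hcon
      exact hnd ⟨rfl, hcon⟩
    unfold sanitize_string_list_py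
    rw [pvLoopA_all_empty mc 0 values [] PySem.Set.empty hall]
    rw [pvDedup_eq_filter_revAcc mc values [], pvRevAcc_all_empty mc values hall]
    simp

theorem sanitize_string_list_py_changed : Claim_changed_sanitize_string_list_py := by
  unfold Claim_changed_sanitize_string_list_py; decide

theorem sanitize_string_list_py_tight : Claim_exact_sanitize_string_list_py := by
  intro values m mc _ _ hd
  rcases hd with ⟨hm0, hex⟩
  subst hm0
  rw [pvB_eq_take values 0 mc le_rfl]
  simp only [Int.toNat_zero, List.take_zero]
  exact pvLoopA_zero_ne_nil mc values hex
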